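-- pv_equiv track=rewrite | github.com/w-v-r/search-service-take-1 | search_service/adapters/in_memory.py | _doc_matches_tokens
-- ===== SOURCE A (Python) =====
-- from typing import Any
--
-- def _doc_matches_tokens(
--     doc: dict[str, Any],
--     tokens: list[str],
--     fields: list[str],
-- ) -> bool:
--     """Return True if every token appears in at least one searchable field."""
--     for token in tokens:
--         found = False
--         for field_name in fields:
--             value = doc.get(field_name)
--             if value is None:
--                 continue
--             if token in str(value).lower():
--                 found = True
--                 break
--         if not found:
--             return False
--     return True
-- ===== SOURCE B (Python) =====
-- def _doc_matches_tokens(doc, tokens, fields):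
--     """Return True if every token appears in at least one searchable field."""
--     field_strs = [str(doc[f]).lower() for f in fields if doc.get(f) is not None]
--     remaining = set(tokens)
--     for fs in field_strs:
--         if not remaining:
--             break
--         remaining = {t for t in remaining if t not in fs}
--     return not remaining
-- ===== Notes on version B (the rewrite author's own statement) =====
-- stated objective: alternative
-- what changed: Loop nesting inverted: B precomputes the lowercased present field strings once, then iterates fields-outer over a shrinking set of still-unmatched tokens (early exit when empty), instead of A's token-outer scan over fields with repeated doc lookups and lowering.
import Mathlib
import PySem

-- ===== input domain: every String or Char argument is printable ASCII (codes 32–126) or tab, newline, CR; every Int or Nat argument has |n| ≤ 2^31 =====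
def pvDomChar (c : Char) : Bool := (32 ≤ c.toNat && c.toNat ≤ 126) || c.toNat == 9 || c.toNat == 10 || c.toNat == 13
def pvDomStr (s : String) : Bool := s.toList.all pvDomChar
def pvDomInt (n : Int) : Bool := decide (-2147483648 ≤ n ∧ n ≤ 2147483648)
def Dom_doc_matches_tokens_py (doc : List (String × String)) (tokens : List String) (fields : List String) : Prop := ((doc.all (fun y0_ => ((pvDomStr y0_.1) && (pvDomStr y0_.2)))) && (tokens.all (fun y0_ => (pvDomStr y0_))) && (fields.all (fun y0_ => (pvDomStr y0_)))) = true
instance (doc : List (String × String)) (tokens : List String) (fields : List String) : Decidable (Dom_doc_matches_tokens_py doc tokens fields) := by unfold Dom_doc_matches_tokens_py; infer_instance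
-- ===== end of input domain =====

-- B inverts the loop nesting: it precomputes the lowercased present field strings once, then walks
-- the fields removing matched tokens from a remaining-set (early exit when empty); same return value.


-- ===== PORT A =====
-- inner 'for field_name in fields: … break' loop of A (found-flag as early return)
def pvAInner (doc : List (String × String)) (token : String) : List String → Bool
  | [] => false
  | fn :: rest =>
    match PySem.Dict.get? (PySem.Dict.mk doc) fn with
    | none => pvAInner doc token rest
    | some v =>
      if PySem.Str.isIn token (PySem.Str.lower v) then true
      else pvAInner doc token rest

def doc_matches_tokens_py (doc : List (String × String)) (tokens : List String) (fields : List String) : Bool :=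
  match tokens with
  | [] => true
  | t :: rest =>
    if pvAInner doc t fields then doc_matches_tokens_py doc rest fields
    else false

-- ===== PORT B =====
-- [str(doc[f]).lower() for f in fields if doc.get(f) is not None]
def pvFieldStrs (doc : List (String × String)) (fields : List String) : List String :=
  fields.filterMap (fun f => (PySem.Dict.get? (PySem.Dict.mk doc) f).map PySem.Str.lower)

-- 'for fs in field_strs: if not remaining: break; remaining = {t for t in remaining if t not in fs}'
def pvBLoop : List String → PySem.Set String → PySem.Set String
  | [], rem => rem
  | fs :: rest, rem =>
    if rem.isEmpty then rem
    else pvBLoop rest (rem.filter (fun t => !(PySem.Str.isIn t fs)))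

def doc_matches_tokens_py_alt (doc : List (String × String)) (tokens : List String) (fields : List String) : Bool :=
  (pvBLoop (pvFieldStrs doc fields) (PySem.Set.ofList tokens)).isEmpty

-- ===== PRECONDITION & SPEC =====
def Spec_doc_matches_tokens_py (doc : List (String × String)) (tokens : List String) (fields : List String) (out : Bool) : Prop := out = doc_matches_tokens_py_alt doc tokens fields
instance (doc : List (String × String)) (tokens : List String) (fields : List String) (out : Bool) : Decidable (Spec_doc_matches_tokens_py doc tokens fields out) := by unfold Spec_doc_matches_tokens_py; infer_instance

-- ===== CLAIM (what is proved, stated in full; the proofs are below) =====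
def Claim_equal_doc_matches_tokens_py : Prop := ∀ (doc : List (String × String)) (tokens : List String) (fields : List String), Dom_doc_matches_tokens_py doc tokens fields → Spec_doc_matches_tokens_py doc tokens fields (doc_matches_tokens_py doc tokens fields)

-- ===== LEMMAS AND PROOFS =====

-- A's inner loop answers: does token occur in some present, lowered field value?
theorem pvAInner_eq_any (doc : List (String × String)) (token : String) (fields : List String) :
    pvAInner doc token fields = (pvFieldStrs doc fields).any (fun fs => PySem.Str.isIn token fs) := by
  induction fields with
  | nil => simp [pvAInner, pvFieldStrs]
  | cons fn rest ih =>
    simp only [pvAInner, pvFieldStrs]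
    cases h : PySem.Dict.get? (PySem.Dict.mk doc) fn with
    | none => simpa [pvFieldStrs, h] using ih
    | some v =>
      simp only [List.filterMap_cons, h, Option.map_some, List.any_cons]
      cases hin : PySem.Chars.isIn token.toList (PySem.Chars.lower v.toList) <;>
        simp [hin, pvFieldStrs, ih]

-- A's outer loop is 'all tokens satisfy the inner loop'
theorem portA_eq_all (doc : List (String × String)) (fields : List String) (tokens : List String) :
    doc_matches_tokens_py doc tokens fields = tokens.all (fun t => pvAInner doc t fields) := by
  induction tokens with
  | nil => rfl
  | cons t rest ih =>
    simp only [doc_matches_tokens_py, List.all_cons]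
    by_cases h : pvAInner doc t fields = true
    · simp [h, ih]
    · simp only [Bool.not_eq_true] at h
      simp [h]

-- B's loop leaves exactly the tokens matched by none of the field strings
theorem pvBLoop_eq_filter (fss : List String) (rem : List String) :
    pvBLoop fss rem = rem.filter (fun t => !(fss.any (fun fs => PySem.Str.isIn t fs))) := by
  induction fss generalizing rem with
  | nil => simp [pvBLoop]
  | cons fs rest ih =>
    simp only [pvBLoop]
    by_cases he : rem.isEmpty = true
    · rw [List.isEmpty_iff] at he
      simp [he]
    · simp only [he, ih, List.filter_filter]
      apply List.filter_congr
      intro t _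
      simp [List.any_cons, Bool.not_or, Bool.and_comm]

theorem doc_matches_tokens_py_eq (doc : List (String × String)) (tokens fields : List String) :
    doc_matches_tokens_py doc tokens fields = doc_matches_tokens_py_alt doc tokens fields := by
  rw [portA_eq_all, doc_matches_tokens_py_alt, pvBLoop_eq_filter]
  simp only [pvAInner_eq_any]
  rw [← Bool.coe_iff_coe]
  simp only [List.all_eq_true, List.isEmpty_iff, List.filter_eq_nil_iff, PySem.Set.mem_ofList,
    Bool.not_eq_eq_eq_not, Bool.not_true, Bool.not_eq_false]

-- ===== VERDICT (by name: the statement is the Claim_ definition above) =====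
theorem doc_matches_tokens_py_spec : Claim_equal_doc_matches_tokens_py := by
  intro doc tokens fields _
  exact doc_matches_tokens_py_eq doc tokens fields
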